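-- pv_equiv track=rewrite | github.com/xlax007/Collection-of-Algorithms | Alterned.py | get_even
-- ===== SOURCE A (Python) =====
-- def get_even(array):
--     maximum = 0
--     position = 0
--     counter_even = 0
--     counter_odd = 0
--     for i in range(len(array)):
--         if int(array[i]) % 2 == 0:
--             counter_even += 1
--         else:
--             counter_odd += 1
--         if int(array[i]) > maximum:
--             maximum = int(array[i])
--             position = i
--
--     return counter_even, counter_odd, position
-- ===== SOURCE B (Python) =====
-- def get_even(array):
--     ints = [int(x) for x in array]
--     counter_even = sum(1 for v in ints if v % 2 == 0)
--     counter_odd = len(ints) - counter_even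
--     m = max(ints) if ints else 0
--     position = ints.index(m) if m > 0 else 0
--     return counter_even, counter_odd, position
-- ===== Notes on version B (the rewrite author's own statement) =====
-- stated objective: simpler
-- what changed: Replaces the single indexed loop with interleaved running state by separate whole-list operations: a comprehension count for evens, subtraction for odds, and max()/list.index() for the position of the first maximum (0 when the maximum is not positive).
import Mathlib
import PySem

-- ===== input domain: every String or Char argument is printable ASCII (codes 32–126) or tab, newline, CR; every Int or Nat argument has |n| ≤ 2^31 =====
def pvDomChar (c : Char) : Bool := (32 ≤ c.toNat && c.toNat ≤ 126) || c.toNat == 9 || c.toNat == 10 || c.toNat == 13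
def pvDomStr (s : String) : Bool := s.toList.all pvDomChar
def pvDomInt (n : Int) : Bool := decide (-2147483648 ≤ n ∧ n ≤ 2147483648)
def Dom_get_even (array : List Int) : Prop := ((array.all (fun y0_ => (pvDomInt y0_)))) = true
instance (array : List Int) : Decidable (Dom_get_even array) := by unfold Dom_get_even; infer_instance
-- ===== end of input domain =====

-- B is a simpler decomposition of A: separate whole-list passes (count of evens, len minus it,
-- max()/index() for the position of the first maximum, 0 when the maximum is not positive).

-- ===== PORT A =====
-- one loop step of A's for-loop: even/odd counting then running-max update
def geStep (st : Int × Int × Int × Int) (p : Int × Int) : Int × Int × Int × Int :=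
  let ce := if PySem.Int.mod p.2 2 == 0 then st.2.2.1 + 1 else st.2.2.1
  let co := if PySem.Int.mod p.2 2 == 0 then st.2.2.2 else st.2.2.2 + 1
  if p.2 > st.1 then (p.2, p.1, ce, co) else (st.1, st.2.1, ce, co)

def get_even (array : List Int) : Int × Int × Int :=
  let s := (PySem.List.enumerate array 0).foldl geStep (0, 0, 0, 0)
  (s.2.2.1, s.2.2.2, s.2.1)

-- ===== PORT B =====
def get_even_alt (array : List Int) : Int × Int × Int :=
  let ce : Int := ((array.filter (fun v => PySem.Int.mod v 2 == 0)).length : Int)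
  let co : Int := (array.length : Int) - ce
  let m : Int := match PySem.List.max? array (fun y => y) with
    | none => 0
    | some m => m
  let position : Int := if m > 0 then (((PySem.List.index? array m).getD 0 : Nat) : Int) else 0
  (ce, co, position)

-- ===== PRECONDITION & SPEC =====
def Spec_get_even (array : List Int) (out : Int × Int × Int) : Prop := out = get_even_alt array
instance (array : List Int) (out : Int × Int × Int) : Decidable (Spec_get_even array out) := by unfold Spec_get_even; infer_instance

-- ===== CLAIM (what is proved, stated in full; the proofs are below) =====
def Claim_equal_get_even : Prop := ∀ (array : List Int), Dom_get_even array → Spec_get_even array (get_even array)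

-- ===== LEMMAS AND PROOFS =====

-- the counter components of A's fold: independent of the max/position state
theorem ge_fold_counts (xs : List Int) (s M P ce co : Int) :
    ((PySem.List.enumerate xs s).foldl geStep (M, P, ce, co)).2.2 =
      (ce + ((xs.filter (fun v => PySem.Int.mod v 2 == 0)).length : Int),
       co + ((xs.filter (fun v => !(PySem.Int.mod v 2 == 0))).length : Int)) := by
  induction xs generalizing s M P ce co with
  | nil => simp [PySem.List.enumerate_nil]
  | cons x t ih =>
    rw [PySem.List.enumerate_cons]
    simp only [List.foldl_cons, geStep]
    by_cases he : Int.fmod x 2 = 0 <;>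
      by_cases hm : x > M <;>
      simp [PySem.Int.mod, he, hm, ih] <;> ring

-- pulling the left argument out of a running max
theorem foldl_max_pull (t : List Int) (x y : Int) :
    List.foldl max (max x y) t = max x (List.foldl max y t) := by
  induction t generalizing y with
  | nil => rfl
  | cons z t' ih => simp only [List.foldl_cons, max_assoc]; exact ih (max y z)

-- max? over a cons, expressed through max? of the tail
theorem max?_cons_split (x : Int) (t : List Int) :
    PySem.List.max? (x :: t) (fun y => y) =
      some (match PySem.List.max? t (fun y => y) with
            | none => x
            | some mt => max x mt) := by
  cases t with
  | nil => simp [PySem.List.max?]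
  | cons y t' =>
    rw [PySem.List.max?_id_cons, PySem.List.max?_id_cons]
    simp only [List.foldl_cons]
    rw [foldl_max_pull]

-- the (maximum, position) components of A's fold: first global maximum if it beats M, else unchanged
theorem ge_fold_max (xs : List Int) (s M P ce co : Int) :
    (((PySem.List.enumerate xs s).foldl geStep (M, P, ce, co)).1,
     ((PySem.List.enumerate xs s).foldl geStep (M, P, ce, co)).2.1) =
      (match PySem.List.max? xs (fun y => y) with
       | none => (M, P)
       | some m => if M < m then (m, s + (((PySem.List.index? xs m).getD 0 : Nat) : Int)) else (M, P)) := by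
  induction xs generalizing s M P ce co with
  | nil => simp [PySem.List.enumerate_nil, PySem.List.max?]
  | cons x t ih =>
    rw [PySem.List.enumerate_cons]
    simp only [List.foldl_cons, geStep]
    rw [max?_cons_split]
    by_cases hm : x > M
    · rw [if_pos hm, ih]
      cases hmt : PySem.List.max? t (fun y => y) with
      | none =>
        have ht : t = [] := by rwa [PySem.List.max?_eq_none_iff] at hmt
        subst ht
        simp [hm]
      | some mt =>
        have hmem : mt ∈ t := PySem.List.max?_mem hmt
        by_cases hlt : x < mt
        · have hne : x ≠ mt := ne_of_lt hlt
          have hMlt : M < mt := lt_trans hm hlt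
          have hmax : max x mt = mt := max_eq_right (le_of_lt hlt)
          obtain ⟨k, hk⟩ := Option.isSome_iff_exists.1 ((PySem.List.index?_isSome_iff t mt).mpr hmem)
          have hcons := PySem.List.index?_cons_of_ne (x := x) (xs := t) (v := mt) hne
          rw [PySem.List.index?_eq_idxOf?, PySem.List.index?_eq_idxOf?] at hcons
          rw [PySem.List.index?_eq_idxOf?] at hk
          simp [hlt, hmax, hMlt, hcons, hk, Prod.ext_iff]
          omega
        · have hmax : max x mt = x := max_eq_left (le_of_not_gt hlt)
          have hself := PySem.List.index?_cons_self (x := x) (xs := t)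
          rw [PySem.List.index?_eq_idxOf?] at hself
          simp [hlt, hmax, hm, hself]
    · rw [if_neg hm, ih]
      have hxM : x ≤ M := le_of_not_gt hm
      cases hmt : PySem.List.max? t (fun y => y) with
      | none =>
        have ht : t = [] := by rwa [PySem.List.max?_eq_none_iff] at hmt
        subst ht
        simp [show ¬ M < x from not_lt.2 hxM]
      | some mt =>
        have hmem : mt ∈ t := PySem.List.max?_mem hmt
        by_cases hMlt : M < mt
        · have hxlt : x < mt := lt_of_le_of_lt hxM hMlt
          have hne : x ≠ mt := ne_of_lt hxlt
          have hmax : max x mt = mt := max_eq_right (le_of_lt hxlt)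
          obtain ⟨k, hk⟩ := Option.isSome_iff_exists.1 ((PySem.List.index?_isSome_iff t mt).mpr hmem)
          have hcons := PySem.List.index?_cons_of_ne (x := x) (xs := t) (v := mt) hne
          rw [PySem.List.index?_eq_idxOf?, PySem.List.index?_eq_idxOf?] at hcons
          rw [PySem.List.index?_eq_idxOf?] at hk
          simp [hmax, hMlt, hcons, hk, Prod.ext_iff]
          omega
        · have h1 : ¬ M < max x mt := by
            rcases max_choice x mt with h | h <;> rw [h]
            · exact hm
            · exact hMlt
          simp [hMlt, h1]

theorem length_filter_not_even (xs : List Int) :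
    ((xs.filter (fun v => !(PySem.Int.mod v 2 == 0))).length : Int) =
      (xs.length : Int) - ((xs.filter (fun v => PySem.Int.mod v 2 == 0)).length : Int) := by
  induction xs with
  | nil => simp
  | cons x t ih =>
    simp only [PySem.Int.mod] at ih ⊢
    by_cases h : Int.fmod x 2 = 0 <;> simp [h, ih] <;> ring

-- ===== VERDICT (by name: the statement is the Claim_ definition above) =====
theorem get_even_spec : Claim_equal_get_even := by
  intro array _
  unfold Spec_get_even
  have hc := ge_fold_counts array 0 0 0 0 0
  have hmx := ge_fold_max array 0 0 0 0 0
  cases hmt : PySem.List.max? array (fun y => y) with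
  | none =>
    have ht : array = [] := by rwa [PySem.List.max?_eq_none_iff] at hmt
    subst ht
    decide
  | some m =>
    rw [hmt] at hmx
    simp only [get_even, get_even_alt, hmt]
    set r := (PySem.List.enumerate array 0).foldl geStep (0, 0, 0, 0) with hr
    have h1 : r.2.2.1 = ((array.filter (fun v => PySem.Int.mod v 2 == 0)).length : Int) := by
      have := congrArg Prod.fst hc; simpa using this
    have h2 : r.2.2.2 = (array.length : Int) -
        ((array.filter (fun v => PySem.Int.mod v 2 == 0)).length : Int) := by
      have := congrArg Prod.snd hc
      simp only at this
      rw [this, length_filter_not_even]; ring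
    have h3 := congrArg Prod.snd hmx
    simp only at h3
    by_cases hpos : (0 : Int) < m
    · rw [if_pos hpos] at h3 ⊢
      rw [h1, h2, h3]
      simp
    · rw [if_neg hpos] at h3 ⊢
      rw [h1, h2, h3]
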